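-- pv_equiv track=rewrite | github.com/anli0726/personal_finace_management | backend/backend.py | generate_month_options
-- ===== SOURCE A (Python) =====
-- def generate_month_options(start_year: int, years: int) -> list[str]:
--     months: list[str] = []
--     if not start_year or not years:
--         return months
--     for year in range(int(start_year), int(start_year) + int(years)):
--         for month in range(1, 13):
--             months.append(f"{year}-{month:02d}")
--     return months
-- ===== SOURCE B (Python) =====
-- def generate_month_options(start_year: int, years: int) -> list[str]:
--     if not start_year or not years:
--         return []
--     return [f"{int(start_year) + i // 12}-{i % 12 + 1:02d}" for i in range(12 * int(years))]
-- ===== Notes on version B (the rewrite author's own statement) =====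
-- stated objective: alternative
-- what changed: Replaces the nested year/month loops appending to an accumulator with a single flat comprehension over range(12*years), deriving year and month from the index by // 12 and % 12 arithmetic.
import Mathlib
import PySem

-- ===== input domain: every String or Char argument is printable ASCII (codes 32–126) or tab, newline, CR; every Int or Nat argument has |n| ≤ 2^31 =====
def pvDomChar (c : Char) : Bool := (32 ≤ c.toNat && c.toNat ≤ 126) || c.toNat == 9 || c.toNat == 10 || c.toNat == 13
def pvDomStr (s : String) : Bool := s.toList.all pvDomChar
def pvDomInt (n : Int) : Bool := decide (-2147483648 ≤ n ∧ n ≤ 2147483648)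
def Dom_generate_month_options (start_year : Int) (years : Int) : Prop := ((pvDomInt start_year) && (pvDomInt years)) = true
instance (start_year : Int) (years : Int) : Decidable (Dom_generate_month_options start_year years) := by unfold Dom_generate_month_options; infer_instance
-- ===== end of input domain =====

-- B replaces A's nested year/month loops by one flat map over range(12*years) with //12 and %12 arithmetic (alternative decomposition, same cost; return-value equivalence, no mutation involved).

-- shared faithful port of the f-string f"{year}-{month:02d}" both Pythons use
def pvFmtYM (year : Int) (month : Int) : String :=
  let s := PySem.Int.toStr month
  PySem.Int.toStr year ++ "-" ++ (if s.toList.length < 2 then "0" ++ s else s)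

-- ===== PORT A =====
def generate_month_options (start_year : Int) (years : Int) : List String :=
  let months : List String := []
  if start_year == 0 || years == 0 then months
  else
    (PySem.List.pyRange start_year (start_year + years) 1).foldl
      (fun months year =>
        (PySem.List.pyRange 1 13 1).foldl
          (fun months month => months ++ [pvFmtYM year month]) months)
      months

-- ===== PORT B =====
def generate_month_options_alt (start_year : Int) (years : Int) : List String :=
  if start_year == 0 || years == 0 then []
  else
    (PySem.List.pyRange 0 (12 * years) 1).map
      (fun i => pvFmtYM (start_year + PySem.Int.floordiv i 12) (PySem.Int.mod i 12 + 1))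

-- ===== PRECONDITION & SPEC =====
def Spec_generate_month_options (start_year : Int) (years : Int) (out : List String) : Prop := out = generate_month_options_alt start_year years
instance (start_year : Int) (years : Int) (out : List String) : Decidable (Spec_generate_month_options start_year years out) := by unfold Spec_generate_month_options; infer_instance

-- ===== CLAIM (what is proved, stated in full; the proofs are below) =====
def Claim_equal_generate_month_options : Prop := ∀ (start_year : Int) (years : Int), Dom_generate_month_options start_year years → Spec_generate_month_options start_year years (generate_month_options start_year years)

-- ===== LEMMAS AND PROOFS =====

-- one year's block of 12 months equals the corresponding slice of B's flat index range
lemma pv_block (f : Int → Int → String) (a m : Int) :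
    (PySem.List.pyRange 1 13 1).map (fun mo => f (a + m) mo)
      = (PySem.List.pyRange (12 * m) (12 * m + 12) 1).map
          (fun i => f (a + PySem.Int.floordiv i 12) (PySem.Int.mod i 12 + 1)) := by
  apply List.ext_getElem
  · simp [PySem.List.length_pyRange_one]
  · intro k h1 h2
    have hk : k < 12 := by
      simpa [PySem.List.length_pyRange_one] using h1
    simp only [List.getElem_map, PySem.List.getElem_pyRange_one]
    have hdiv : PySem.Int.floordiv (12 * m + (k : Int)) 12 = m := by
      rw [PySem.Int.floordiv_eq_iff_of_pos (by norm_num)]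
      constructor <;> [omega; (push_cast; omega)]
    have hmod : PySem.Int.mod (12 * m + (k : Int)) 12 = (k : Int) := by
      have := PySem.Int.floordiv_mul_add_mod (12 * m + (k : Int)) 12
      rw [hdiv] at this; omega
    rw [hdiv, hmod]
    congr 1
    omega

-- A's nested iteration over n years equals B's flat iteration over 12*n indices
lemma pv_key (f : Int → Int → String) (a : Int) (n : Nat) :
    (PySem.List.pyRange a (a + (n : Int)) 1).flatMap
        (fun yr => (PySem.List.pyRange 1 13 1).map (fun mo => f yr mo))
      = (PySem.List.pyRange 0 (12 * (n : Int)) 1).map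
          (fun i => f (a + PySem.Int.floordiv i 12) (PySem.Int.mod i 12 + 1)) := by
  induction n with
  | zero => simp [PySem.List.pyRange_one_eq_nil]
  | succ n ih =>
    have h1 : a + ((n + 1 : Nat) : Int) = (a + (n : Int)) + 1 := by push_cast; ring
    have h2 : 12 * (((n + 1 : Nat)) : Int) = 12 * (n : Int) + 12 := by push_cast; ring
    rw [h1, PySem.List.pyRange_one_succ_right (by omega), h2,
      PySem.List.pyRange_one_append 0 (12 * (n : Int)) (12 * (n : Int) + 12) (by positivity) (by omega),
      List.flatMap_append, List.map_append, ih]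
    simp only [List.flatMap_cons, List.flatMap_nil, List.append_nil]
    rw [pv_block f a (n : Int)]

-- ===== VERDICT (by name: the statement is the Claim_ definition above) =====
theorem generate_month_options_spec : Claim_equal_generate_month_options := by
  intro a y _
  unfold Spec_generate_month_options generate_month_options generate_month_options_alt
  by_cases hguard : a == 0 || y == 0
  · simp [hguard]
  · simp only [hguard, Bool.false_eq_true, if_false]
    simp only [PySem.List.foldl_append_singleton_eq_map, List.nil_append,
      PySem.List.foldl_append_eq_flatMap]
    rcases le_or_gt y 0 with hy | hy
    · have e1 : PySem.List.pyRange a (a + y) 1 = [] := PySem.List.pyRange_one_eq_nil (by omega)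
      have e2 : PySem.List.pyRange 0 (12 * y) 1 = [] := PySem.List.pyRange_one_eq_nil (by omega)
      rw [e1, e2]; simp
    · obtain ⟨n, rfl⟩ : ∃ n : Nat, y = (n : Int) := ⟨y.toNat, (Int.toNat_of_nonneg hy.le).symm⟩
      exact pv_key pvFmtYM a n
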